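-- pv_equiv track=rewrite | github.com/KEIEI-NET/BugSearch2 | core/rule_engine.py | get_severity_distribution
-- ===== SOURCE A (Python) =====
-- from typing import List, Dict, Any, Optional
--
-- def get_severity_distribution(issues: List[Dict[str, Any]]) -> Dict[str, int]:
--     """問題の深刻度分布を取得"""
--     distribution = {
--         'critical': 0,  # 9-10
--         'high': 0,      # 7-8
--         'medium': 0,    # 4-6
--         'low': 0,       # 1-3
--     }
--
--     for issue in issues:
--         severity = issue['severity']
--         if severity >= 9:
--             distribution['critical'] += 1
--         elif severity >= 7:
--             distribution['high'] += 1
--         elif severity >= 4: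
--             distribution['medium'] += 1
--         else:
--             distribution['low'] += 1
--
--     return distribution
-- ===== SOURCE B (Python) =====
-- def _bisect_left(a, x):
--     lo, hi = 0, len(a)
--     while lo < hi:
--         mid = (lo + hi) // 2
--         if a[mid] < x:
--             lo = mid + 1
--         else:
--             hi = mid
--     return lo
--
-- def get_severity_distribution(issues):
--     """問題の深刻度分布を取得"""
--     sev = sorted(issue['severity'] for issue in issues)
--     i1 = _bisect_left(sev, 4)
--     i2 = _bisect_left(sev, 7)
--     i3 = _bisect_left(sev, 9)
--     return {'critical': len(sev) - i3, 'high': i3 - i2, 'medium': i2 - i1, 'low': i1}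
-- ===== Notes on version B (the rewrite author's own statement) =====
-- stated objective: alternative
-- what changed: Replaced the per-item four-way branch counter with eager severity extraction, a sort, and binary-search (bisect_left) boundary indices at 4/7/9 whose differences give the four bucket counts.
import Mathlib
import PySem

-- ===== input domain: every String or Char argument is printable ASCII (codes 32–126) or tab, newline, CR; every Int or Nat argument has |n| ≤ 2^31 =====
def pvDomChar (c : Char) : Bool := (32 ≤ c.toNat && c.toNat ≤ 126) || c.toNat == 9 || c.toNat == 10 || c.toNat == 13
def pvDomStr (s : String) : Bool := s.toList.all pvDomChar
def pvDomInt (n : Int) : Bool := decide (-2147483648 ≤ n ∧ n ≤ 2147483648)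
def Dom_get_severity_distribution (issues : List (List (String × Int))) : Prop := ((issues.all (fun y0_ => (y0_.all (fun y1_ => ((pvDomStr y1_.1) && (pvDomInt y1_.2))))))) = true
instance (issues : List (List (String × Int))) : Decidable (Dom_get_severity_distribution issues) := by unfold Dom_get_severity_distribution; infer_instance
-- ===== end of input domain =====

-- B replaces the per-item four-way branch counter with sort + binary-search boundary indices; alternative decomposition, not faster.

-- issue['severity'] — dict lookup, first match per the assoc-list convention; 0 is unreachable under Pre_ (key present)
def pvSev (issue : List (String × Int)) : Int :=
  match issue.find? (fun p => p.1 == "severity") with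
  | some p => p.2
  | none => 0

-- ===== PORT A =====
-- the loop body of A, updating the four counters (critical, high, medium, low) in branch order
def pvStepA (st : Int × Int × Int × Int) (issue : List (String × Int)) : Int × Int × Int × Int :=
  let severity := pvSev issue
  if 9 ≤ severity then (st.1 + 1, st.2.1, st.2.2.1, st.2.2.2)
  else if 7 ≤ severity then (st.1, st.2.1 + 1, st.2.2.1, st.2.2.2)
  else if 4 ≤ severity then (st.1, st.2.1, st.2.2.1 + 1, st.2.2.2)
  else (st.1, st.2.1, st.2.2.1, st.2.2.2 + 1)

def get_severity_distribution (issues : List (List (String × Int))) : List (String × Int) :=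
  let st := issues.foldl pvStepA (0, 0, 0, 0)
  [("critical", st.1), ("high", st.2.1), ("medium", st.2.2.1), ("low", st.2.2.2)]

-- ===== PORT B =====
-- hand-written _bisect_left from Source B; a.getD mid 0 is exact since lo ≤ mid < hi ≤ a.length
def pvBisectLeft (a : List Int) (x : Int) (lo hi : Nat) : Nat :=
  if h : lo < hi then
    let mid := (lo + hi) / 2
    if a.getD mid 0 < x then pvBisectLeft a x (mid + 1) hi
    else pvBisectLeft a x lo mid
  else lo
termination_by hi - lo
decreasing_by
  · omega
  · omega

def get_severity_distribution_alt (issues : List (List (String × Int))) : List (String × Int) :=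
  let sev := PySem.List.sorted (issues.map pvSev) (fun s => s) false
  let i1 := pvBisectLeft sev 4 0 sev.length
  let i2 := pvBisectLeft sev 7 0 sev.length
  let i3 := pvBisectLeft sev 9 0 sev.length
  [("critical", (sev.length : Int) - (i3 : Int)), ("high", (i3 : Int) - (i2 : Int)),
   ("medium", (i2 : Int) - (i1 : Int)), ("low", (i1 : Int))]

-- ===== PRECONDITION & SPEC =====
-- Pre_ excludes issues missing the 'severity' key, on which both Pythons raise KeyError.
def Pre_get_severity_distribution (issues : List (List (String × Int))) : Prop :=
  (issues.all (fun issue => issue.any (fun p => p.1 == "severity"))) = true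
instance (issues : List (List (String × Int))) : Decidable (Pre_get_severity_distribution issues) := by unfold Pre_get_severity_distribution; infer_instance

def pvWitness_get_severity_distribution : (List (List (String × Int))) :=
  [[("severity", 5)], [("severity", 9), ("id", 1)], [("severity", 1)]]

def Spec_get_severity_distribution (issues : List (List (String × Int))) (out : List (String × Int)) : Prop := out = get_severity_distribution_alt issues
instance (issues : List (List (String × Int))) (out : List (String × Int)) : Decidable (Spec_get_severity_distribution issues out) := by unfold Spec_get_severity_distribution; infer_instance

-- ===== CLAIM (what is proved, stated in full; the proofs are below) =====
def Claim_equal_get_severity_distribution : Prop := ∀ (issues : List (List (String × Int))), Dom_get_severity_distribution issues → Pre_get_severity_distribution issues → Spec_get_severity_distribution issues (get_severity_distribution issues)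

-- ===== LEMMAS AND PROOFS =====

-- A's fold counts the four severity bands of the extracted severities
theorem foldA_eq (issues : List (List (String × Int))) :
    ∀ (c h m lo : Int), issues.foldl pvStepA (c, h, m, lo) =
      (c + ((issues.map pvSev).countP (fun s => decide (9 ≤ s)) : Int),
       h + ((issues.map pvSev).countP (fun s => decide (7 ≤ s) && decide (s < 9)) : Int),
       m + ((issues.map pvSev).countP (fun s => decide (4 ≤ s) && decide (s < 7)) : Int),
       lo + ((issues.map pvSev).countP (fun s => decide (s < 4)) : Int)) := by
  induction issues with
  | nil => intro c h m lo; simp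
  | cons issue rest ih =>
    intro c h m lo
    have hstep : List.foldl pvStepA (c, h, m, lo) (issue :: rest)
        = List.foldl pvStepA (pvStepA (c, h, m, lo) issue) rest := rfl
    rw [hstep]
    simp only [List.map_cons, List.countP_cons]
    by_cases h9 : 9 ≤ pvSev issue <;> by_cases h7 : 7 ≤ pvSev issue <;>
      by_cases h4 : 4 ≤ pvSev issue <;>
      first
      | omega
      | (simp only [pvStepA, h9, h7, h4, if_pos, if_neg, not_false_iff]
         rw [ih]
         simp only [decide_eq_true_eq]
         split_ifs <;> simp_all <;> omega)

-- countP of a prefix-shaped predicate equals the split point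
theorem countP_eq_of_split (p : Int → Bool) :
    ∀ (a : List Int) (r : Nat), r ≤ a.length →
    (∀ j (hj : j < a.length), j < r → p a[j]) →
    (∀ j (hj : j < a.length), r ≤ j → p a[j] = false) →
    a.countP p = r := by
  intro a
  induction a with
  | nil =>
    intro r hr _ _
    simp only [List.length_nil, Nat.le_zero] at hr
    simp [hr]
  | cons y t ih =>
    intro r hr hlow hhigh
    cases r with
    | zero =>
      have hy : p y = false := by
        simpa using hhigh 0 (by simp) (by omega)
      have ht : t.countP p = 0 := by
        apply ih 0 (by omega)
        · intro j hj hjr; omega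
        · intro j hj _
          simpa using hhigh (j + 1) (by simp; omega) (by omega)
      simp [hy, ht]
    | succ k =>
      have hy : p y = true := by
        simpa using hlow 0 (by simp) (by omega)
      have ht : t.countP p = k := by
        apply ih k (by simp at hr; omega)
        · intro j hj hjk
          simpa using hlow (j + 1) (by simp; omega) (by omega)
        · intro j hj hkj
          simpa using hhigh (j + 1) (by simp; omega) (by omega)
      simp [hy, ht]

-- spec of the hand-rolled binary search on a ≤-sorted list
theorem pvBisect_spec (a : List Int) (x : Int) (hs : a.Pairwise (· ≤ ·)) :
    ∀ (n lo hi : Nat), hi - lo = n → lo ≤ hi → hi ≤ a.length →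
    (∀ j (hj : j < a.length), j < lo → a[j] < x) →
    (∀ j (hj : j < a.length), hi ≤ j → x ≤ a[j]) →
    lo ≤ pvBisectLeft a x lo hi ∧ pvBisectLeft a x lo hi ≤ hi ∧
    (∀ j (hj : j < a.length), j < pvBisectLeft a x lo hi → a[j] < x) ∧
    (∀ j (hj : j < a.length), pvBisectLeft a x lo hi ≤ j → x ≤ a[j]) := by
  have hmono : ∀ i j (hi : i < a.length) (hj : j < a.length), i ≤ j → a[i] ≤ a[j] := by
    intro i j hi hj hij
    rcases Nat.lt_or_ge i j with h | h
    · exact (List.pairwise_iff_getElem.mp hs) i j hi hj h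
    · have : i = j := by omega
      subst this; exact le_refl _
  intro n
  induction n using Nat.strong_induction_on with
  | _ n ihn =>
    intro lo hi hn hlohi hhilen hlow hhigh
    rw [pvBisectLeft]
    by_cases hlt : lo < hi
    · simp only [hlt, dif_pos]
      have hmidlt : (lo + hi) / 2 < a.length := by omega
      have hget : a.getD ((lo + hi) / 2) 0 = a[(lo + hi) / 2] := List.getD_eq_getElem a 0 hmidlt
      by_cases hm : a.getD ((lo + hi) / 2) 0 < x
      · simp only [hm, if_pos]
        have hrec := ihn (hi - ((lo + hi) / 2 + 1)) (by omega) ((lo + hi) / 2 + 1) hi rfl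
            (by omega) hhilen
            (by intro j hj hjm
                have : a[j] ≤ a[(lo + hi) / 2] := hmono j _ hj hmidlt (by omega)
                rw [hget] at hm; omega)
            hhigh
        exact ⟨by omega, hrec.2.1, hrec.2.2⟩
      · simp only [hm, if_neg, not_false_iff]
        have hrec := ihn ((lo + hi) / 2 - lo) (by omega) lo ((lo + hi) / 2) rfl (by omega)
            (by omega) hlow
            (by intro j hj hjm
                have h1 : a[(lo + hi) / 2] ≤ a[j] := hmono _ j hmidlt hj (by omega)
                rw [hget] at hm; omega)
        exact ⟨hrec.1, by omega, hrec.2.2⟩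
    · simp only [hlt, dif_neg, not_false_iff]
      have : lo = hi := by omega
      exact ⟨le_refl _, by omega, fun j hj hjlo => hlow j hj hjlo,
             fun j hj hloj => hhigh j hj (by omega)⟩

-- pvBisectLeft on the sorted list counts the elements < x
theorem pvBisect_eq_countP (a : List Int) (x : Int) (hs : a.Pairwise (· ≤ ·)) :
    pvBisectLeft a x 0 a.length = a.countP (fun s => decide (s < x)) := by
  have hspec := pvBisect_spec a x hs (a.length - 0) 0 a.length rfl (by omega) (le_refl _)
    (by intro j hj hjo; omega) (by intro j hj hle; omega)
  symm
  apply countP_eq_of_split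
  · exact hspec.2.1
  · intro j hj hjr
    simpa using hspec.2.2.1 j hj hjr
  · intro j hj hrj
    have := hspec.2.2.2 j hj hrj
    simp only [decide_eq_false_iff_not]
    omega

-- boundary count splits into the two sub-band counts
theorem countP_bands : ∀ (xs : List Int) (a b : Int), a ≤ b →
    xs.countP (fun s => decide (s < b)) =
      xs.countP (fun s => decide (s < a)) + xs.countP (fun s => decide (a ≤ s) && decide (s < b)) := by
  intro xs
  induction xs with
  | nil => intro a b _; simp
  | cons y t ih =>
    intro a b hab
    simp only [List.countP_cons]
    rw [ih a b hab]
    split_ifs <;> simp_all <;> omega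

-- the whole list splits at a boundary
theorem countP_total : ∀ (xs : List Int) (b : Int),
    xs.length = xs.countP (fun s => decide (s < b)) + xs.countP (fun s => decide (b ≤ s)) := by
  intro xs
  induction xs with
  | nil => intro b; simp
  | cons y t ih =>
    intro b
    simp only [List.countP_cons, List.length_cons]
    rw [ih b]
    split_ifs <;> simp_all <;> omega

theorem main_eq (issues : List (List (String × Int))) :
    get_severity_distribution issues = get_severity_distribution_alt issues := by
  unfold get_severity_distribution get_severity_distribution_alt
  rw [foldA_eq]
  set xs := issues.map pvSev with hxs
  set sev := PySem.List.sorted xs (fun s => s) false with hsev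
  have hperm : sev.Perm xs := PySem.List.sorted_perm xs (fun s => s) false
  have hpw : sev.Pairwise (· ≤ ·) := by
    have := PySem.List.sorted_pairwise xs (fun s => s)
    simpa using this
  have hlen : sev.length = xs.length := hperm.length_eq
  have hb : ∀ x : Int, pvBisectLeft sev x 0 sev.length = xs.countP (fun s => decide (s < x)) := by
    intro x
    rw [pvBisect_eq_countP sev x hpw, hperm.countP_eq]
  simp only [hb]
  have h47 := countP_bands xs 4 7 (by omega)
  have h79 := countP_bands xs 7 9 (by omega)
  have h9 := countP_total xs 9
  simp only [List.cons.injEq, Prod.mk.injEq, and_true, true_and, hlen]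
  refine ⟨?_, ?_, ?_, ?_⟩ <;> omega

-- ===== VERDICT (by name: the statement is the Claim_ definition above) =====
theorem get_severity_distribution_spec : Claim_equal_get_severity_distribution := by
  intro issues _ _
  exact (main_eq issues).symm ▸ rfl
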